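-- pv_equiv track=rewrite | github.com/jejoonlee/TIL-and-Coding-Test | Baekjoon/문제풀이_날짜별/20220822_28/1.Silver_5_1769_3의_배수.py | three_mult
-- ===== SOURCE A (Python) =====
-- def three_mult(N, cnt):
--     if len(N) == 1:
--         if N[0] % 3 == 0:
--             return (cnt, 'YES')
--         else:
--             return (cnt, 'NO')
--
--     else:
--         cnt += 1
--         N = list(map(int, str(sum(N))))
--         return three_mult(N, cnt)
-- ===== SOURCE B (Python) =====
-- def three_mult(N, cnt):
--     if len(N) == 1:
--         v = N[0]
--     else:
--         cnt += 1
--         v = sum(N)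
--         while v > 9:
--             cnt += 1
--             d = 0
--             t = v
--             while t > 0:
--                 d += t % 10
--                 t //= 10
--             v = d
--     return (cnt, 'YES') if v % 3 == 0 else (cnt, 'NO')
-- ===== Notes on version B (the rewrite author's own statement) =====
-- stated objective: alternative
-- what changed: A recursively rebuilds a digit LIST via str()/map(int,...) each round; B is an iterative scalar loop that keeps only the current value and computes each digit sum arithmetically with % and // — no strings and no intermediate lists.
-- crash fix: On inputs with len(N) != 1 and sum(N) < 0, A raises ValueError (int('-') on the sign of str(sum(N))); B returns (cnt+1, 'YES'/'NO') judged from the negative sum itself. — e.g. on three_mult([-1, -2], 0): A raises ValueError, B returns (1, "YES")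
import Mathlib
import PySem

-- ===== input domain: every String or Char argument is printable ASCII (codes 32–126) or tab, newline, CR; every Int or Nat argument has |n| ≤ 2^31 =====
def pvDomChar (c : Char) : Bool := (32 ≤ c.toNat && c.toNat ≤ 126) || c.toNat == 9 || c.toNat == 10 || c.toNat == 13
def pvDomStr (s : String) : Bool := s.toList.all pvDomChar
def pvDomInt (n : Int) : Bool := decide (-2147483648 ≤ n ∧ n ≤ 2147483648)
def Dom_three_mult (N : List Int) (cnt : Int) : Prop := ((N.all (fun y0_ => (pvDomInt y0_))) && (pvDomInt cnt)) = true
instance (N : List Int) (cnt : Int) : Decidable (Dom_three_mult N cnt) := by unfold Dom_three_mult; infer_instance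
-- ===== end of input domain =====

-- B replaces A's recursion-with-string-digit-splitting by iterative scalar loops that
-- extract digits arithmetically (divmod), never building intermediate lists or strings.
-- Neither version mutates its argument. Both ports use explicit fuel solely as a
-- totalization guard; the proofs show the supplied fuel is never exhausted on Pre_ inputs.

-- ===== PORT A =====
-- int(c) on a single character; none = ValueError
def pvParseDigit (c : Char) : Option Int := PySem.Int.ofChars? [c]

-- list(map(int, str(sum(N)))) ; none = ValueError (exactly when sum(N) < 0, via '-')
def pvStepA (N : List Int) : Option (List Int) :=
  (PySem.Int.toChars N.sum).mapM pvParseDigit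

def pvThreeMultGo : ℕ → List Int → Int → Int × String
  | 0, _, cnt => (cnt, "")  -- fuel exhausted: never reached for the fuel three_mult supplies
  | fuel + 1, N, cnt =>
    if N.length = 1 then
      if PySem.Int.mod ((PySem.List.pyGet? N 0).getD 0) 3 = 0 then (cnt, "YES")
      else (cnt, "NO")
    else
      match pvStepA N with
      | none => (cnt + 1, "")  -- Python raises ValueError here (sum < 0); excluded by Pre_
      | some M => pvThreeMultGo fuel M (cnt + 1)

def three_mult (N : List Int) (cnt : Int) : Int × String :=
  pvThreeMultGo (N.sum.toNat + 2) N cnt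

-- ===== PORT B =====
-- return (cnt, 'YES') if v % 3 == 0 else (cnt, 'NO')
def pvRet (v : Int) (cnt : Int) : Int × String :=
  if PySem.Int.mod v 3 = 0 then (cnt, "YES") else (cnt, "NO")

-- while t > 0: d += t % 10; t //= 10
def pvDigitSumGo : ℕ → Int → Int → Int
  | 0, _, d => d  -- fuel exhausted: never reached for the fuel pvDigitSum supplies
  | fuel + 1, t, d =>
    if 0 < t then pvDigitSumGo fuel (PySem.Int.floordiv t 10) (d + PySem.Int.mod t 10)
    else d

def pvDigitSum (t : Int) : Int := pvDigitSumGo t.toNat t 0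

-- while v > 9: cnt += 1; v = <digit sum of v>  ; then the final return
def pvBGo : ℕ → Int → Int → Int × String
  | 0, _, cnt => (cnt, "")  -- fuel exhausted: never reached for the fuel three_mult_alt supplies
  | fuel + 1, v, cnt =>
    if 9 < v then pvBGo fuel (pvDigitSum v) (cnt + 1)
    else pvRet v cnt

def three_mult_alt (N : List Int) (cnt : Int) : Int × String :=
  if N.length = 1 then pvRet ((PySem.List.pyGet? N 0).getD 0) cnt
  else pvBGo (N.sum.toNat + 1) N.sum (cnt + 1)

-- ===== PRECONDITION & SPEC =====
-- Pre_ excludes exactly the inputs where A raises ValueError: len(N) != 1 and sum(N) < 0,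
-- where str(sum(N)) starts with '-' and int('-') fails.
def Pre_three_mult (N : List Int) (cnt : Int) : Prop := N.length = 1 ∨ 0 ≤ N.sum
instance (N : List Int) (cnt : Int) : Decidable (Pre_three_mult N cnt) := by
  unfold Pre_three_mult; infer_instance

def pvWitness_three_mult : List Int × Int := ([3, 4, 5], 0)

def Spec_three_mult (N : List Int) (cnt : Int) (out : Int × String) : Prop := out = three_mult_alt N cnt
instance (N : List Int) (cnt : Int) (out : Int × String) : Decidable (Spec_three_mult N cnt out) := by
  unfold Spec_three_mult; infer_instance

-- On inputs with len(N) != 1 and sum(N) < 0, A raises ValueError (int('-')); B returns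
-- (cnt+1, 'YES'/'NO') judged from the negative sum itself.
def Raises_three_mult (N : List Int) (cnt : Int) : Prop := N.length ≠ 1 ∧ N.sum < 0
instance (N : List Int) (cnt : Int) : Decidable (Raises_three_mult N cnt) := by
  unfold Raises_three_mult; infer_instance

def pvRaiseWitness_three_mult : List Int × Int := ([-1, -2], 0)
def pvRaiseWitnessOut_three_mult : Int × String := (1, "YES")

-- ===== CLAIM (what is proved, stated in full; the proofs are below) =====
def Claim_equal_three_mult : Prop := ∀ (N : List Int) (cnt : Int), Dom_three_mult N cnt → Pre_three_mult N cnt → Spec_three_mult N cnt (three_mult N cnt)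

def Claim_raises_three_mult : Prop := (∀ (N : List Int) (cnt : Int), Dom_three_mult N cnt → Raises_three_mult N cnt → ¬ Pre_three_mult N cnt) ∧ (Dom_three_mult (pvRaiseWitness_three_mult.1) (pvRaiseWitness_three_mult.2) ∧ Raises_three_mult (pvRaiseWitness_three_mult.1) (pvRaiseWitness_three_mult.2) ∧ three_mult_alt (pvRaiseWitness_three_mult.1) (pvRaiseWitness_three_mult.2) = pvRaiseWitnessOut_three_mult)

-- ===== LEMMAS AND PROOFS =====

-- decimal digit sum is at most n, and strictly less for n ≥ 10
theorem pvSumDigits_le (n : ℕ) : (Nat.digits 10 n).sum ≤ n := by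
  induction n using Nat.strong_induction_on with
  | _ n ih =>
    rcases Nat.eq_zero_or_pos n with h | h
    · simp [h]
    · rw [Nat.digits_def' (by norm_num : 1 < 10) h]
      have h1 : (Nat.digits 10 (n / 10)).sum ≤ n / 10 := ih _ (Nat.div_lt_self h (by norm_num))
      simp only [List.sum_cons]
      omega

theorem pvSumDigits_lt (n : ℕ) (h : 10 ≤ n) : (Nat.digits 10 n).sum < n := by
  rw [Nat.digits_def' (by norm_num : 1 < 10) (by omega)]
  have h1 : (Nat.digits 10 (n / 10)).sum ≤ n / 10 := pvSumDigits_le _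
  simp only [List.sum_cons]
  omega

-- the Int digit list produced by `list(map(int, str(n)))` for a nonnegative n
def pvDigitsInt (n : ℕ) : List Int :=
  if n = 0 then [0] else ((Nat.digits 10 n).map Int.ofNat).reverse

theorem pvDigitsInt_sum (n : ℕ) : (pvDigitsInt n).sum = ((Nat.digits 10 n).sum : Int) := by
  unfold pvDigitsInt
  split
  · simp [*]
  · rw [List.sum_reverse, Nat.cast_list_sum]
    rfl

theorem pvDigitsInt_small (n : ℕ) (h : n ≤ 9) : pvDigitsInt n = [(n : Int)] := by
  unfold pvDigitsInt
  rcases Nat.eq_zero_or_pos n with h0 | h0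
  · simp [h0]
  · rw [if_neg (by omega), Nat.digits_def' (by norm_num : 1 < 10) h0]
    rw [Nat.div_eq_of_lt (by omega), Nat.mod_eq_of_lt (by omega)]
    simp

theorem pvDigitsInt_len_big (n : ℕ) (h : 10 ≤ n) : (pvDigitsInt n).length ≠ 1 := by
  unfold pvDigitsInt
  rw [if_neg (by omega), Nat.digits_def' (by norm_num : 1 < 10) (by omega)]
  have h1 : Nat.digits 10 (n / 10) ≠ [] := by
    rw [Nat.digits_ne_nil_iff_ne_zero]
    omega
  intro hc
  apply h1
  cases hd : Nat.digits 10 (n / 10) with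
  | nil => rfl
  | cons a l => rw [hd] at hc; simp at hc

theorem pvParseDigit_digitChar (d : ℕ) (h : d < 10) :
    pvParseDigit (Nat.digitChar d) = some (Int.ofNat d) := by
  interval_cases d <;> decide

theorem pvMapM_digitChar (l : List ℕ) (h : ∀ d ∈ l, d < 10) :
    (l.map Nat.digitChar).mapM pvParseDigit = some (l.map Int.ofNat) := by
  induction l with
  | nil => rfl
  | cons a t ih =>
    simp only [List.map_cons, List.mapM_cons]
    rw [pvParseDigit_digitChar a (h a (by simp)), ih (fun d hd => h d (by simp [hd]))]
    rfl

theorem pvToDigitsCore_eq (f : ℕ) : ∀ (n : ℕ) (acc : List Char), n < f →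
    Nat.toDigitsCore 10 f n acc =
      (if n = 0 then ['0'] else ((Nat.digits 10 n).map Nat.digitChar).reverse) ++ acc := by
  induction f with
  | zero => intro n acc h; omega
  | succ f ih =>
    intro n acc h
    rcases Nat.eq_zero_or_pos n with h0 | h0
    · subst h0
      simp only [Nat.toDigitsCore, Nat.div_eq_of_lt (by norm_num : (0:ℕ) < 10)]
      simp [Nat.digitChar]
    · rw [if_neg (by omega), Nat.digits_def' (by norm_num : 1 < 10) h0]
      simp only [Nat.toDigitsCore]
      rcases Nat.eq_zero_or_pos (n / 10) with hd | hd
      · rw [if_pos hd, hd]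
        simp
      · rw [if_neg (by omega)]
        rw [ih (n / 10) _ (by have := Nat.div_lt_self h0 (by norm_num : 1 < 10); omega)]
        rw [if_neg (by omega)]
        simp

theorem pvMapM_toDigits (n : ℕ) :
    (Nat.toDigits 10 n).mapM pvParseDigit = some (pvDigitsInt n) := by
  unfold Nat.toDigits
  rw [pvToDigitsCore_eq (n + 1) n [] (by omega), List.append_nil]
  unfold pvDigitsInt
  rcases Nat.eq_zero_or_pos n with h0 | h0
  · subst h0; decide
  · rw [if_neg (by omega), if_neg (by omega)]
    rw [← List.map_reverse]
    rw [pvMapM_digitChar _ (fun d hd => Nat.digits_lt_base (by norm_num) (List.mem_reverse.mp hd))]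
    simp [List.map_reverse]

theorem pvStepA_nonneg (N : List Int) (h : 0 ≤ N.sum) :
    pvStepA N = some (pvDigitsInt N.sum.toNat) := by
  unfold pvStepA PySem.Int.toChars
  rw [if_neg (by omega)]
  exact pvMapM_toDigits _

-- B's inner loop computes the decimal digit sum (given enough fuel)
theorem pvDigitSumGo_eq (f : ℕ) : ∀ (t d : Int), 0 ≤ t → t.toNat ≤ f →
    pvDigitSumGo f t d = d + ((Nat.digits 10 t.toNat).sum : Int) := by
  induction f with
  | zero =>
    intro t d h hf
    rw [(by omega : t = 0)]
    simp [pvDigitSumGo]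
  | succ f ih =>
    intro t d h hf
    rw [pvDigitSumGo]
    by_cases hpos : 0 < t
    · rw [if_pos hpos]
      rw [PySem.Int.floordiv_eq_ediv_of_pos (by norm_num),
          PySem.Int.mod_eq_emod_of_pos (by norm_num)]
      rw [ih (t / 10) _ (by omega) (by omega)]
      have h1 : (t / 10).toNat = t.toNat / 10 := by omega
      have hds : Nat.digits 10 t.toNat = t.toNat % 10 :: Nat.digits 10 (t.toNat / 10) :=
        Nat.digits_def' (by norm_num : 1 < 10) (by omega)
      rw [h1, hds, List.sum_cons]
      push_cast
      omega
    · rw [if_neg hpos, (by omega : t = 0)]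
      simp

theorem pvDigitSum_eq (t : Int) (h : 0 ≤ t) :
    pvDigitSum t = ((Nat.digits 10 t.toNat).sum : Int) := by
  unfold pvDigitSum
  rw [pvDigitSumGo_eq t.toNat t 0 h (le_refl _)]
  simp

-- A's recursion on a digit list equals B's scalar loop on the underlying value,
-- for any sufficient fuel on both sides
theorem pv_main (s : ℕ) : ∀ (c : Int) (f g : ℕ), s < f → s < g →
    pvThreeMultGo f (pvDigitsInt s) c = pvBGo g (s : Int) c := by
  induction s using Nat.strong_induction_on with
  | _ s ih =>
    intro c f g hf hg
    obtain ⟨f, rfl⟩ : ∃ f', f = f' + 1 := ⟨f - 1, by omega⟩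
    obtain ⟨g, rfl⟩ : ∃ g', g = g' + 1 := ⟨g - 1, by omega⟩
    rcases le_or_gt s 9 with hs | hs
    · rw [pvDigitsInt_small s hs, pvThreeMultGo, pvBGo]
      rw [if_pos (show [(s : Int)].length = 1 from rfl),
          if_neg (show ¬ (9 : Int) < (s : Int) by omega)]
      unfold pvRet
      rw [PySem.List.pyGet?_zero_cons]
      rfl
    · rw [pvThreeMultGo, pvBGo]
      rw [if_neg (pvDigitsInt_len_big s (by omega)), if_pos (by omega : (9 : Int) < (s : Int))]
      have hsum : (pvDigitsInt s).sum = ((Nat.digits 10 s).sum : Int) := pvDigitsInt_sum s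
      have hstep : pvStepA (pvDigitsInt s) = some (pvDigitsInt (Nat.digits 10 s).sum) := by
        rw [pvStepA_nonneg _ (by rw [hsum]; positivity), hsum, Int.toNat_natCast]
      rw [hstep]
      rw [pvDigitSum_eq _ (by omega), Int.toNat_natCast]
      have hlt := pvSumDigits_lt s (by omega)
      exact ih _ hlt (c + 1) f g (by omega) (by omega)

-- ===== VERDICT (by name: the statement is the Claim_ definition above) =====
theorem three_mult_spec : Claim_equal_three_mult := by
  unfold Claim_equal_three_mult Spec_three_mult Pre_three_mult
  intro N cnt _ hpre
  by_cases hlen : N.length = 1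
  · rw [three_mult, pvThreeMultGo, three_mult_alt, if_pos hlen, if_pos hlen]
    rfl
  · have hpos : 0 ≤ N.sum := by tauto
    rw [three_mult, pvThreeMultGo, three_mult_alt, if_neg hlen, if_neg hlen]
    rw [pvStepA_nonneg N hpos]
    have := pv_main N.sum.toNat (cnt + 1) (N.sum.toNat + 1) (N.sum.toNat + 1)
      (by omega) (by omega)
    rw [Int.toNat_of_nonneg hpos] at this
    exact this

theorem three_mult_raises : Claim_raises_three_mult := by
  unfold Claim_raises_three_mult
  constructor
  · intro N cnt _ ⟨h1, h2⟩
    unfold Pre_three_mult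
    push Not
    exact ⟨h1, by omega⟩
  · exact ⟨by decide, by decide, by decide⟩

-- self-check: the raise witness really lies in the region Raises_ describes
theorem pvRaiseWitness_ok :
    Raises_three_mult pvRaiseWitness_three_mult.1 pvRaiseWitness_three_mult.2 :=
  three_mult_raises.2.2.1
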